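-- pv_equiv track=rewrite | github.com/San-Panhavuth/NovelTTS | backend/scripts/ingest_edge_tts_voices.py | _tag_energy
-- ===== SOURCE A (Python) =====
-- def _tag_energy(personalities: list[str]) -> str:
--     high_energy = {"lively", "cheerful", "excited", "energetic", "positive"}
--     low_energy = {"gentle", "soft", "calm", "soothing", "whispering"}
--     pl = {p.lower() for p in personalities}
--     if pl & high_energy:
--         return "high"
--     if pl & low_energy:
--         return "low"
--     return "medium"
-- ===== SOURCE B (Python) =====
-- # Rank-based reduction: one word->score table, take the max score, decode it.
-- _SCORE = {
--     "lively": 2, "cheerful": 2, "excited": 2, "energetic": 2, "positive": 2,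
--     "gentle": 1, "soft": 1, "calm": 1, "soothing": 1, "whispering": 1,
-- }
--
--
-- def _tag_energy(personalities: list[str]) -> str:
--     best = 0
--     for p in personalities:
--         best = max(best, _SCORE.get(p.lower(), 0))
--     return "high" if best == 2 else ("low" if best == 1 else "medium")
-- ===== Notes on version B (the rewrite author's own statement) =====
-- stated objective: alternative
-- what changed: Replaces the two priority-ordered set intersections by a numeric ranking: a single word-to-score dictionary (high=2, low=1, default 0), a max-reduction over the lowercased elements, and a decode of the maximal score, so the high-over-low precedence is arithmetic (max) instead of branch order.
import Mathlib
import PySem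

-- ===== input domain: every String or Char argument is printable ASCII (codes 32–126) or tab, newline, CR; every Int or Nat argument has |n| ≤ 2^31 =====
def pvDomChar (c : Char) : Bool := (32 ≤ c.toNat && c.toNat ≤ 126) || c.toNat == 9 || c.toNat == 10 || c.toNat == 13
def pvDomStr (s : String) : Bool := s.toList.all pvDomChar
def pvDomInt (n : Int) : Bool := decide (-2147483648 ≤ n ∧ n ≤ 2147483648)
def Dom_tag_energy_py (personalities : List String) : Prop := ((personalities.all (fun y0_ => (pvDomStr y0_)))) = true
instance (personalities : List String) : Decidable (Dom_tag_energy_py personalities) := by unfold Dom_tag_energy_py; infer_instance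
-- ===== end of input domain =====

-- B replaces the two priority-ordered set intersections by a word→score dictionary,
-- a max-reduction over the lowercased elements, and a decode of the maximal score;
-- alternative decomposition, same cost.

-- ===== PORT A =====
def tag_energy_py (personalities : List String) : String :=
  let high_energy : PySem.Set String :=
    PySem.Set.ofList ["lively", "cheerful", "excited", "energetic", "positive"]
  let low_energy : PySem.Set String :=
    PySem.Set.ofList ["gentle", "soft", "calm", "soothing", "whispering"]
  let pl : PySem.Set String := PySem.Set.ofList (personalities.map PySem.Str.lower)
  if PySem.Set.inter pl high_energy ≠ [] then "high"
  else if PySem.Set.inter pl low_energy ≠ [] then "low"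
  else "medium"

-- ===== PORT B =====
def pvScore : PySem.Dict String Int :=
  PySem.Dict.ofList
    [("lively", 2), ("cheerful", 2), ("excited", 2), ("energetic", 2), ("positive", 2),
     ("gentle", 1), ("soft", 1), ("calm", 1), ("soothing", 1), ("whispering", 1)]

def tag_energy_py_alt (personalities : List String) : String :=
  let best := personalities.foldl
    (fun (b : Int) p => max b (pvScore.getD (PySem.Str.lower p) 0)) 0
  if best = 2 then "high" else if best = 1 then "low" else "medium"

-- ===== PRECONDITION & SPEC =====
def Spec_tag_energy_py (personalities : List String) (out : String) : Prop := out = tag_energy_py_alt personalities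
instance (personalities : List String) (out : String) : Decidable (Spec_tag_energy_py personalities out) := by unfold Spec_tag_energy_py; infer_instance

-- ===== CLAIM (what is proved, stated in full; the proofs are below) =====
def Claim_equal_tag_energy_py : Prop := ∀ (personalities : List String), Dom_tag_energy_py personalities → Spec_tag_energy_py personalities (tag_energy_py personalities)

-- ===== LEMMAS AND PROOFS =====

-- proof-only names for the two constant sets A intersects with
def pvHigh : PySem.Set String :=
  PySem.Set.ofList ["lively", "cheerful", "excited", "energetic", "positive"]
def pvLow : PySem.Set String :=
  PySem.Set.ofList ["gentle", "soft", "calm", "soothing", "whispering"]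

-- B's score table in terms of A's two sets
theorem pv_sc_eq (q : String) :
    pvScore.getD q 0 = if q ∈ pvHigh then 2 else if q ∈ pvLow then 1 else 0 := by
  have hmk : pvScore = PySem.Dict.mk
      [("lively", 2), ("cheerful", 2), ("excited", 2), ("energetic", 2), ("positive", 2),
       ("gentle", 1), ("soft", 1), ("calm", 1), ("soothing", 1), ("whispering", 1)] := by decide
  by_cases h1 : q = "lively"
  · subst h1; rw [hmk]
    simp [pvHigh, PySem.Set.mem_ofList, PySem.Dict.getD_eq_get?_getD, PySem.Dict.get?_mk_cons]
  by_cases h2 : q = "cheerful"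
  · subst h2; rw [hmk]
    simp [pvHigh, PySem.Set.mem_ofList, PySem.Dict.getD_eq_get?_getD, PySem.Dict.get?_mk_cons]
  by_cases h3 : q = "excited"
  · subst h3; rw [hmk]
    simp [pvHigh, PySem.Set.mem_ofList, PySem.Dict.getD_eq_get?_getD, PySem.Dict.get?_mk_cons]
  by_cases h4 : q = "energetic"
  · subst h4; rw [hmk]
    simp [pvHigh, PySem.Set.mem_ofList, PySem.Dict.getD_eq_get?_getD, PySem.Dict.get?_mk_cons]
  by_cases h5 : q = "positive"
  · subst h5; rw [hmk]
    simp [pvHigh, PySem.Set.mem_ofList, PySem.Dict.getD_eq_get?_getD, PySem.Dict.get?_mk_cons]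
  by_cases h6 : q = "gentle"
  · subst h6; rw [hmk]
    simp [pvHigh, pvLow, PySem.Set.mem_ofList, PySem.Dict.getD_eq_get?_getD, PySem.Dict.get?_mk_cons]
  by_cases h7 : q = "soft"
  · subst h7; rw [hmk]
    simp [pvHigh, pvLow, PySem.Set.mem_ofList, PySem.Dict.getD_eq_get?_getD, PySem.Dict.get?_mk_cons]
  by_cases h8 : q = "calm"
  · subst h8; rw [hmk]
    simp [pvHigh, pvLow, PySem.Set.mem_ofList, PySem.Dict.getD_eq_get?_getD, PySem.Dict.get?_mk_cons]
  by_cases h9 : q = "soothing"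
  · subst h9; rw [hmk]
    simp [pvHigh, pvLow, PySem.Set.mem_ofList, PySem.Dict.getD_eq_get?_getD, PySem.Dict.get?_mk_cons]
  by_cases h10 : q = "whispering"
  · subst h10; rw [hmk]
    simp [pvHigh, pvLow, PySem.Set.mem_ofList, PySem.Dict.getD_eq_get?_getD, PySem.Dict.get?_mk_cons]
  have hH : q ∉ pvHigh := by
    rw [pvHigh, PySem.Set.mem_ofList]; simp [h1, h2, h3, h4, h5]
  have hL : q ∉ pvLow := by
    rw [pvLow, PySem.Set.mem_ofList]; simp [h6, h7, h8, h9, h10]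
  rw [if_neg hH, if_neg hL, hmk]
  have b1 : ("lively" == q) = false := beq_eq_false_iff_ne.mpr (fun h => h1 h.symm)
  have b2 : ("cheerful" == q) = false := beq_eq_false_iff_ne.mpr (fun h => h2 h.symm)
  have b3 : ("excited" == q) = false := beq_eq_false_iff_ne.mpr (fun h => h3 h.symm)
  have b4 : ("energetic" == q) = false := beq_eq_false_iff_ne.mpr (fun h => h4 h.symm)
  have b5 : ("positive" == q) = false := beq_eq_false_iff_ne.mpr (fun h => h5 h.symm)
  have b6 : ("gentle" == q) = false := beq_eq_false_iff_ne.mpr (fun h => h6 h.symm)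
  have b7 : ("soft" == q) = false := beq_eq_false_iff_ne.mpr (fun h => h7 h.symm)
  have b8 : ("calm" == q) = false := beq_eq_false_iff_ne.mpr (fun h => h8 h.symm)
  have b9 : ("soothing" == q) = false := beq_eq_false_iff_ne.mpr (fun h => h9 h.symm)
  have b10 : ("whispering" == q) = false := beq_eq_false_iff_ne.mpr (fun h => h10 h.symm)
  simp only [PySem.Dict.getD_eq_get?_getD, PySem.Dict.get?_mk_cons,
    b1, b2, b3, b4, b5, b6, b7, b8, b9, b10, if_false, Bool.false_eq_true]
  simp [PySem.Dict.get?]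

-- B's max-fold characterised
theorem pv_fold_char (l : List String) (b : Int) (hb : b = 0 ∨ b = 1 ∨ b = 2) :
    l.foldl (fun (b : Int) p => max b (pvScore.getD (PySem.Str.lower p) 0)) b =
      if b = 2 ∨ l.any (fun p => decide (PySem.Str.lower p ∈ pvHigh)) then 2
      else if b = 1 ∨ l.any (fun p => decide (PySem.Str.lower p ∈ pvLow)) then 1
      else 0 := by
  induction l generalizing b with
  | nil =>
    rcases hb with rfl | rfl | rfl <;> simp
  | cons x xs ih =>
    simp only [List.foldl_cons, List.any_cons]
    rw [pv_sc_eq (PySem.Str.lower x)]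
    by_cases hx : PySem.Str.lower x ∈ pvHigh
    · rw [if_pos hx]
      have hb' : max b 2 = 2 := by rcases hb with rfl | rfl | rfl <;> decide
      rw [hb', ih 2 (by right; right; rfl)]
      simp [hx]
    · rw [if_neg hx]
      by_cases hl : PySem.Str.lower x ∈ pvLow
      · rw [if_pos hl]
        have hb' : max b 1 = if b = 2 then 2 else 1 := by
          rcases hb with rfl | rfl | rfl <;> decide
        rw [hb']
        by_cases h2 : b = 2
        · rw [if_pos h2, ih 2 (by right; right; rfl)]
          simp [h2]
        · rw [if_neg h2, ih 1 (by right; left; rfl)]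
          simp [hx, hl, h2]
      · rw [if_neg hl]
        have hb' : max b 0 = b := by rcases hb with rfl | rfl | rfl <;> decide
        rw [hb', ih b hb]
        simp [hx, hl]

-- A's set-intersection test as an existence test over the original list.
theorem pv_inter_ne_nil (l : List String) (s : PySem.Set String) :
    (PySem.Set.inter (PySem.Set.ofList (l.map PySem.Str.lower)) s ≠ [])
      ↔ l.any (fun p => decide (PySem.Str.lower p ∈ s)) = true := by
  constructor
  · intro h
    rcases List.exists_mem_of_ne_nil _ h with ⟨x, hx⟩
    rw [PySem.Set.mem_inter] at hx
    rcases hx with ⟨hx1, hx2⟩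
    rw [PySem.Set.mem_ofList, List.mem_map] at hx1
    rcases hx1 with ⟨p, hp, rfl⟩
    simp only [List.any_eq_true]
    exact ⟨p, hp, by simpa using hx2⟩
  · intro h
    simp only [List.any_eq_true] at h
    rcases h with ⟨p, hp, hc⟩
    intro hnil
    have : PySem.Str.lower p ∈ PySem.Set.inter (PySem.Set.ofList (l.map PySem.Str.lower)) s := by
      rw [PySem.Set.mem_inter, PySem.Set.mem_ofList]
      exact ⟨List.mem_map.mpr ⟨p, hp, rfl⟩, by simpa using hc⟩
    rw [hnil] at this
    simp at this

-- ===== VERDICT (by name: the statement is the Claim_ definition above) =====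
theorem tag_energy_py_spec : Claim_equal_tag_energy_py := by
  intro l _
  unfold Spec_tag_energy_py tag_energy_py tag_energy_py_alt
  have e1 : PySem.Set.ofList ["lively", "cheerful", "excited", "energetic", "positive"] = pvHigh := rfl
  have e2 : PySem.Set.ofList ["gentle", "soft", "calm", "soothing", "whispering"] = pvLow := rfl
  rw [e1, e2, pv_fold_char l 0 (Or.inl rfl)]
  by_cases hh : l.any (fun p => decide (PySem.Str.lower p ∈ pvHigh)) = true
  · rw [if_pos ((pv_inter_ne_nil l pvHigh).mpr hh)]
    simp [hh]
  · rw [if_neg (fun c => hh ((pv_inter_ne_nil l pvHigh).mp c))]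
    by_cases hl : l.any (fun p => decide (PySem.Str.lower p ∈ pvLow)) = true
    · rw [if_pos ((pv_inter_ne_nil l pvLow).mpr hl)]
      simp [hh, hl]
    · rw [if_neg (fun c => hl ((pv_inter_ne_nil l pvLow).mp c))]
      simp [hh, hl]
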